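-- pv_equiv track=rewrite | github.com/pavithragowda00/python-projects | incident_summary.py | summarize_incident
-- ===== SOURCE A (Python) =====
-- HIGH_THRESHOLD = 80
--
-- MEDIUM_THRESHOLD = 50
--
-- def classify_indicator(indicator):
--     score = indicator["score"]
--
--     if score >= HIGH_THRESHOLD:
--         return "HIGH"
--     elif score >= MEDIUM_THRESHOLD:
--         return "MEDIUM"
--     else:
--         return "LOW"
--
-- def summarize_incident(indicators_list):
--     """Return highest level and counts (like an incident summary)."""
--     high = 0
--     medium = 0
--     low = 0
--
--     for item in indicators_list:
--         level = classify_indicator(item)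
--
--         if level == "HIGH":
--             high += 1
--         elif level == "MEDIUM":
--             medium += 1
--         else:
--             low += 1
--
--     if high > 0:
--         final_level = "HIGH"
--     elif medium > 0:
--         final_level = "MEDIUM"
--     else:
--         final_level = "LOW"
--
--     return final_level, high, medium, low
-- ===== SOURCE B (Python) =====
-- HIGH_THRESHOLD = 80
--
-- MEDIUM_THRESHOLD = 50
--
-- def classify_indicator(indicator):
--     score = indicator["score"]
--
--     if score >= HIGH_THRESHOLD:
--         return "HIGH"
--     elif score >= MEDIUM_THRESHOLD:
--         return "MEDIUM"
--     else:
--         return "LOW"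
--
-- def summarize_incident(indicators_list):
--     """Return highest level and counts (like an incident summary)."""
--     high = sum(1 for i in indicators_list if classify_indicator(i) == "HIGH")
--     medium = sum(1 for i in indicators_list if classify_indicator(i) == "MEDIUM")
--     low = sum(1 for i in indicators_list if classify_indicator(i) == "LOW")
--
--     if not indicators_list:
--         return "LOW", 0, 0, 0
--
--     top = max(i["score"] for i in indicators_list)
--     return classify_indicator({"score": top}), high, medium, low
-- ===== Notes on version B (the rewrite author's own statement) =====
-- stated objective: alternative
-- what changed: Replaces the single accumulating loop plus counter-priority ladder by three independent counting passes and a final level derived by classifying the maximum score (monotonicity of the classifier makes the two agree).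
import Mathlib
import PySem

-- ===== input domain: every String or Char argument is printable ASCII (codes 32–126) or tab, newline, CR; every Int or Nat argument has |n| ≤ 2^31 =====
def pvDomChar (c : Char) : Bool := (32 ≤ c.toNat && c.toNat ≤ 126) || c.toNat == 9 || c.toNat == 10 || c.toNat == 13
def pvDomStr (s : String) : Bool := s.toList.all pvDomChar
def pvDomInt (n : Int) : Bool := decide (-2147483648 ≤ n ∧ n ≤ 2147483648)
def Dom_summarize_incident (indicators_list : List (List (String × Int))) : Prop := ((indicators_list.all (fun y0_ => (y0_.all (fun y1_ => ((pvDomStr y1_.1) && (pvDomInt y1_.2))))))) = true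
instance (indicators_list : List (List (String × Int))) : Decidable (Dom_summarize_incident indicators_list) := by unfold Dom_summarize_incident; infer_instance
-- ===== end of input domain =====

-- B replaces the single accumulating loop + priority ladder by three counting passes and a
-- final level obtained by classifying the maximum score; same cost, different decomposition.

-- ===== PORT A =====
-- shared module helper: indicator["score"] (first match in the association list; Pre_ guarantees presence)
def scoreOf (indicator : List (String × Int)) : Int :=
  (((indicator.find? (fun p => p.1 == "score")).map (fun p => p.2)).getD 0)

def classify_indicator (indicator : List (String × Int)) : String :=
  let score := scoreOf indicator
  if score ≥ 80 then "HIGH" else if score ≥ 50 then "MEDIUM" else "LOW"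

def summarize_incident (indicators_list : List (List (String × Int))) : String × Int × Int × Int :=
  let counts := indicators_list.foldl
    (fun (acc : Int × Int × Int) item =>
      let level := classify_indicator item
      if level == "HIGH" then (acc.1 + 1, acc.2.1, acc.2.2)
      else if level == "MEDIUM" then (acc.1, acc.2.1 + 1, acc.2.2)
      else (acc.1, acc.2.1, acc.2.2 + 1))
    (0, 0, 0)
  let final_level :=
    if counts.1 > 0 then "HIGH"
    else if counts.2.1 > 0 then "MEDIUM"
    else "LOW"
  (final_level, counts.1, counts.2.1, counts.2.2)

-- ===== PORT B =====
def summarize_incident_alt (indicators_list : List (List (String × Int))) : String × Int × Int × Int :=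
  let high : Int := (indicators_list.countP (fun i => classify_indicator i == "HIGH") : Int)
  let medium : Int := (indicators_list.countP (fun i => classify_indicator i == "MEDIUM") : Int)
  let low : Int := (indicators_list.countP (fun i => classify_indicator i == "LOW") : Int)
  if indicators_list = [] then ("LOW", 0, 0, 0)
  else
    let top := (PySem.List.max? (indicators_list.map scoreOf) (fun x => x)).getD 0
    (classify_indicator [("score", top)], high, medium, low)

-- ===== PRECONDITION & SPEC =====
-- Pre_ excludes exactly the inputs where an indicator lacks the "score" key, on which Python A
-- (and B alike) raises KeyError.
def Pre_summarize_incident (indicators_list : List (List (String × Int))) : Prop :=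
  (indicators_list.all (fun d => d.any (fun p => p.1 == "score"))) = true
instance (indicators_list : List (List (String × Int))) : Decidable (Pre_summarize_incident indicators_list) := by unfold Pre_summarize_incident; infer_instance
def pvWitness_summarize_incident : (List (List (String × Int))) := [[("score", 90)], [("score", 12)]]

def Spec_summarize_incident (indicators_list : List (List (String × Int))) (out : String × Int × Int × Int) : Prop := out = summarize_incident_alt indicators_list
instance (indicators_list : List (List (String × Int))) (out : String × Int × Int × Int) : Decidable (Spec_summarize_incident indicators_list out) := by unfold Spec_summarize_incident; infer_instance

-- ===== CLAIM (what is proved, stated in full; the proofs are below) =====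
def Claim_equal_summarize_incident : Prop := ∀ (indicators_list : List (List (String × Int))), Dom_summarize_incident indicators_list → Pre_summarize_incident indicators_list → Spec_summarize_incident indicators_list (summarize_incident indicators_list)

-- ===== LEMMAS AND PROOFS =====

theorem classify_cases (x : List (String × Int)) :
    classify_indicator x = "HIGH" ∨ classify_indicator x = "MEDIUM" ∨ classify_indicator x = "LOW" := by
  unfold classify_indicator
  by_cases h1 : scoreOf x ≥ 80 <;> by_cases h2 : scoreOf x ≥ 50 <;> simp [h1, h2]

-- A's folded counters, started at (a,b,c), add B's three independent counts.
theorem counts_lemma (lst : List (List (String × Int))) (a b c : Int) :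
    lst.foldl
      (fun (acc : Int × Int × Int) item =>
        let level := classify_indicator item
        if level == "HIGH" then (acc.1 + 1, acc.2.1, acc.2.2)
        else if level == "MEDIUM" then (acc.1, acc.2.1 + 1, acc.2.2)
        else (acc.1, acc.2.1, acc.2.2 + 1))
      (a, b, c)
    = (a + (lst.countP (fun i => classify_indicator i == "HIGH") : Int),
       b + (lst.countP (fun i => classify_indicator i == "MEDIUM") : Int),
       c + (lst.countP (fun i => classify_indicator i == "LOW") : Int)) := by
  induction lst generalizing a b c with
  | nil => simp
  | cons x t ih =>
    rcases classify_cases x with h | h | h <;>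
      simp only [List.foldl_cons, List.countP_cons, h] <;>
      simp only [ih] <;> simp <;> omega

-- the level A derives from its counters equals B's classification of the maximum score
theorem level_eq (lst : List (List (String × Int))) (m : Int)
    (hmem : m ∈ lst.map scoreOf) (hmaxall : ∀ y ∈ lst.map scoreOf, y ≤ m) :
    (if ((lst.countP (fun i => classify_indicator i == "HIGH") : Int)) > 0 then "HIGH"
     else if ((lst.countP (fun i => classify_indicator i == "MEDIUM") : Int)) > 0 then "MEDIUM"
     else "LOW")
    = classify_indicator [("score", m)] := by
  obtain ⟨i, hi, hsi⟩ := List.mem_map.mp hmem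
  have hclass : classify_indicator [("score", m)]
      = if m ≥ 80 then "HIGH" else if m ≥ 50 then "MEDIUM" else "LOW" := by
    simp [classify_indicator, scoreOf, List.find?]
  rw [hclass]
  by_cases h80 : m ≥ 80
  · have hpi : (classify_indicator i == "HIGH") = true := by
      simp [classify_indicator, hsi, h80]
    have hpos : 0 < lst.countP (fun i => classify_indicator i == "HIGH") :=
      List.countP_pos_iff.mpr ⟨i, hi, hpi⟩
    have hpos' : (0 : Int) < (lst.countP (fun i => classify_indicator i == "HIGH") : Int) := by
      exact_mod_cast hpos
    rw [if_pos hpos', if_pos h80]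
  · have hH0 : lst.countP (fun i => classify_indicator i == "HIGH") = 0 := by
      apply List.countP_eq_zero.mpr
      intro j hj
      have hle : scoreOf j ≤ m := hmaxall _ (List.mem_map.mpr ⟨j, hj, rfl⟩)
      have hlt : ¬ scoreOf j ≥ 80 := by omega
      simp [classify_indicator, hlt]
      split_ifs <;> simp
    have hH0' : ¬ ((0 : Int) < (lst.countP (fun i => classify_indicator i == "HIGH") : Int)) := by
      simp [hH0]
    rw [if_neg hH0', if_neg h80]
    by_cases h50 : m ≥ 50
    · have hpi : (classify_indicator i == "MEDIUM") = true := by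
        simp [classify_indicator, hsi, h80, h50]
      have hpos : 0 < lst.countP (fun i => classify_indicator i == "MEDIUM") :=
        List.countP_pos_iff.mpr ⟨i, hi, hpi⟩
      have hpos' : (0 : Int) < (lst.countP (fun i => classify_indicator i == "MEDIUM") : Int) := by
        exact_mod_cast hpos
      rw [if_pos hpos', if_pos h50]
    · have hM0 : lst.countP (fun i => classify_indicator i == "MEDIUM") = 0 := by
        apply List.countP_eq_zero.mpr
        intro j hj
        have hle : scoreOf j ≤ m := hmaxall _ (List.mem_map.mpr ⟨j, hj, rfl⟩)
        have h1 : ¬ scoreOf j ≥ 80 := by omega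
        have h2 : ¬ scoreOf j ≥ 50 := by omega
        simp [classify_indicator, h1, h2]
      have hM0' : ¬ ((0 : Int) < (lst.countP (fun i => classify_indicator i == "MEDIUM") : Int)) := by
        simp [hM0]
      rw [if_neg hM0', if_neg h50]

theorem summarize_incident_eq_alt (lst : List (List (String × Int))) :
    summarize_incident lst = summarize_incident_alt lst := by
  unfold summarize_incident summarize_incident_alt
  cases lst with
  | nil => simp
  | cons x t =>
    have hmax : PySem.List.max? ((x :: t).map scoreOf) (fun x => x)
        = some ((t.map scoreOf).foldl max (scoreOf x)) := by
      simp [PySem.List.max?_id_cons]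
    generalize hm : (t.map scoreOf).foldl max (scoreOf x) = m at hmax
    have hmem : m ∈ (x :: t).map scoreOf := PySem.List.max?_mem hmax
    have hmaxall : ∀ y ∈ (x :: t).map scoreOf, y ≤ m := fun y hy =>
      PySem.List.max?_isMax hmax y hy
    have hcons : (x :: t) ≠ [] := by simp
    simp only [counts_lemma, zero_add, if_neg hcons, hmax, Option.getD_some]
    exact Prod.ext (level_eq (x :: t) m hmem hmaxall) rfl

-- ===== VERDICT (by name: the statement is the Claim_ definition above) =====
theorem summarize_incident_spec : Claim_equal_summarize_incident := by
  intro lst _ _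
  exact summarize_incident_eq_alt lst
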